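-- pv_equiv track=rewrite | github.com/WallarooLabs/wally | testing/correctness/apps/multi_partition_detector/_validate.py | validate_stream
-- ===== SOURCE A (Python) =====
-- def validate_stream(stream):
--     # rules
--     # 1. increments are either +1 or +n, n>1
--     # 1.1. if +1, still same contiguous segment
--     # 1.2. if +n,n>1, new segment
--     # 2. decrements unbounded, by should only go down to floor.
--     # 2.1. Floor is initially 0, and is set to the new value after each
--     # decrement
--     # 2.2. Decrements are part of a contiugous segment, but also imply a
--     # rollback
--     # output is: count of segments, count of rollbacks
--
--     if len(stream) == 0:
--         return (0, 0)
--     elif len(stream) == 1: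
--         return (1, 0)
--
--     a = stream[0]
--     floor = a
--     segments = 1
--     rollbacks = 0
--
--     for v in stream[1:]:
--         diff = v-a
--         if diff == 1:
--             a = v
--             continue
--         if diff > 1:
--             segments += 1
--             a = v
--             continue
--         if diff < 1:
--             rollbacks += 1
--             a = v
--             floor = v
--             continue
--     return (segments, rollbacks)
-- ===== SOURCE B (Python) =====
-- def validate_stream(stream):
--     if not stream:
--         return (0, 0)
--     # Partition the stream into maximal contiguous segments: a jump (>1 step)
--     # starts a new segment, anything else extends the current one.
--     chunks = [[stream[0]]]
--     for v in stream[1:]: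
--         if v - chunks[-1][-1] > 1:
--             chunks.append([v])
--         else:
--             chunks[-1].append(v)
--     # A rollback is a non-increasing step; all such steps lie inside segments.
--     rollbacks = sum(1 for c in chunks for x, y in zip(c, c[1:]) if y <= x)
--     return (len(chunks), rollbacks)
-- ===== Notes on version B (the rewrite author's own statement) =====
-- stated objective: alternative
-- what changed: B materializes the stream as an explicit partition into maximal contiguous segments (cutting where a step exceeds 1), then returns the number of segments and a nested count of non-increasing steps inside the segments, instead of A's single stateful scan with counters.
import Mathlib
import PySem

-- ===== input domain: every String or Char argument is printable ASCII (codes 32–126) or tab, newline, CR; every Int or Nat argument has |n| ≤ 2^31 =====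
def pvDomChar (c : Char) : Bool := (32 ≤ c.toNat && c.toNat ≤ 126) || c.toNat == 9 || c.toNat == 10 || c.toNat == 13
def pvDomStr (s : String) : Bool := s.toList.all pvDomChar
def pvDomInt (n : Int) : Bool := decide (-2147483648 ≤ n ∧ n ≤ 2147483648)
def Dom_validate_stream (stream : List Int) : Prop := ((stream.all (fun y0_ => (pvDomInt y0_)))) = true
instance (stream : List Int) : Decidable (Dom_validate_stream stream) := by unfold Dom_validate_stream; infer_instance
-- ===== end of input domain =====

-- B partitions the stream into explicit maximal segments and counts them and the
-- non-increasing steps inside them, instead of A's stateful counter scan (objective: alternative).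

-- ===== PORT A =====
-- loop state: (a, floor, segments, rollbacks)
def pvStepA (st : Int × Int × Int × Int) (v : Int) : Int × Int × Int × Int :=
  let a := st.1
  let floor := st.2.1
  let segments := st.2.2.1
  let rollbacks := st.2.2.2
  let diff := v - a
  if diff = 1 then (v, floor, segments, rollbacks)
  else if diff > 1 then (v, floor, segments + 1, rollbacks)
  else (v, v, segments, rollbacks + 1)   -- remaining case is diff < 1

def validate_stream (stream : List Int) : Int × Int :=
  match stream with
  | [] => (0, 0)
  | [_] => (1, 0)
  | a :: rest =>
    let st := rest.foldl pvStepA (a, a, 1, 0)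
    (st.2.2.1, st.2.2.2)

-- ===== PORT B =====
-- one step of the chunk-building loop: start a new chunk on a jump (>1), else extend the last
def pvStepB (chunks : List (List Int)) (v : Int) : List (List Int) :=
  if v - (chunks.getLastD []).getLastD 0 > 1 then chunks ++ [[v]]
  else chunks.dropLast ++ [(chunks.getLastD []) ++ [v]]

-- number of non-increasing adjacent steps inside one chunk
def pvRollb (c : List Int) : Int :=
  (((c.zip c.tail).countP (fun p => p.2 ≤ p.1) : Nat) : Int)

def validate_stream_alt (stream : List Int) : Int × Int :=
  match stream with
  | [] => (0, 0)
  | a :: rest =>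
    let chunks := rest.foldl pvStepB [[a]]
    ((chunks.length : Int), (chunks.map pvRollb).sum)

-- ===== PRECONDITION & SPEC =====
def Spec_validate_stream (stream : List Int) (out : Int × Int) : Prop := out = validate_stream_alt stream
instance (stream : List Int) (out : Int × Int) : Decidable (Spec_validate_stream stream out) := by unfold Spec_validate_stream; infer_instance

-- ===== CLAIM (what is proved, stated in full; the proofs are below) =====
def Claim_equal_validate_stream : Prop := ∀ (stream : List Int), Dom_validate_stream stream → Spec_validate_stream stream (validate_stream stream)

-- ===== LEMMAS AND PROOFS =====

-- the list of consecutive differences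
def pvDiffs (xs : List Int) : List Int := (xs.zip xs.tail).map (fun p => p.2 - p.1)

lemma pvDiffs_cons (a v : Int) (t : List Int) :
    pvDiffs (a :: v :: t) = (v - a) :: pvDiffs (v :: t) := by
  simp [pvDiffs]

-- A's loop adds the two diff-counts to the running counters
lemma loopA (rest : List Int) (a f s r : Int) :
    ((rest.foldl pvStepA (a, f, s, r)).2.2.1,
     (rest.foldl pvStepA (a, f, s, r)).2.2.2) =
      (s + (((pvDiffs (a :: rest)).countP (fun d => d > 1) : Nat) : Int),
       r + (((pvDiffs (a :: rest)).countP (fun d => d < 1) : Nat) : Int)) := by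
  induction rest generalizing a f s r with
  | nil => simp [pvDiffs]
  | cons v t ih =>
    have hstep : List.foldl pvStepA (a, f, s, r) (v :: t) =
        List.foldl pvStepA (pvStepA (a, f, s, r) v) t := rfl
    rw [hstep, pvDiffs_cons]
    by_cases h1 : v - a = 1
    · have : pvStepA (a, f, s, r) v = (v, f, s, r) := by simp [pvStepA, h1]
      rw [this, ih v f s r]; simp [h1]
    · by_cases h2 : v - a > 1
      · have : pvStepA (a, f, s, r) v = (v, f, s + 1, r) := by simp [pvStepA, h1, h2]
        rw [this, ih v f (s+1) r]
        have hlt : ¬ (v - a < 1) := by omega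
        simp [h2, hlt]; ring
      · have hlt : v - a < 1 := by omega
        have : pvStepA (a, f, s, r) v = (v, v, s, r + 1) := by simp [pvStepA, h1, h2]
        rw [this, ih v v s (r+1)]
        simp [h2, hlt]; ring

lemma zip_tail_concat (c : List Int) (x v : Int) :
    ((c ++ [x]) ++ [v]).zip ((c ++ [x]) ++ [v]).tail =
      (c ++ [x]).zip (c ++ [x]).tail ++ [(x, v)] := by
  induction c with
  | nil => rfl
  | cons y ys ih =>
    cases ys with
    | nil => rfl
    | cons z zs =>
      simpa using congrArg (List.cons (y, z)) (by simpa using ih)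

lemma pvRollb_concat (c : List Int) (x v : Int) :
    pvRollb (c ++ [x, v]) = pvRollb (c ++ [x]) + (if v ≤ x then 1 else 0) := by
  have h : c ++ [x, v] = (c ++ [x]) ++ [v] := by simp
  rw [h]
  unfold pvRollb
  rw [zip_tail_concat, List.countP_append]
  split_ifs with hle <;> simp [hle]

-- B's loop: from a well-formed chunk state, it adds the diff-counts to length and rollback sum
lemma loopB (rest : List Int) (a : Int) (ps : List (List Int)) (c : List Int) :
    (((rest.foldl pvStepB (ps ++ [c ++ [a]])).length : Int),
     ((rest.foldl pvStepB (ps ++ [c ++ [a]])).map pvRollb).sum) =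
      (((ps ++ [c ++ [a]]).length : Int) + (((pvDiffs (a :: rest)).countP (fun d => d > 1) : Nat) : Int),
       ((ps ++ [c ++ [a]]).map pvRollb).sum + (((pvDiffs (a :: rest)).countP (fun d => d < 1) : Nat) : Int)) := by
  induction rest generalizing a ps c with
  | nil => simp [pvDiffs]
  | cons v t ih =>
    have hlast : ((ps ++ [c ++ [a]]).getLastD []).getLastD 0 = a := by
      simp
    have hstep : List.foldl pvStepB (ps ++ [c ++ [a]]) (v :: t) =
        List.foldl pvStepB (pvStepB (ps ++ [c ++ [a]]) v) t := rfl
    rw [hstep, pvDiffs_cons]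
    by_cases h2 : v - a > 1
    · have hs : pvStepB (ps ++ [c ++ [a]]) v = (ps ++ [c ++ [a]]) ++ [[] ++ [v]] := by
        simp [pvStepB, h2]
      rw [hs, ih v ((ps ++ [c ++ [a]])) []]
      have hlt : ¬ (v - a < 1) := by omega
      rw [Prod.mk.injEq]
      constructor
      · simp [h2]
        ring
      · simp [hlt, pvRollb]
    · have hs : pvStepB (ps ++ [c ++ [a]]) v = ps ++ [(c ++ [a]) ++ [v]] := by
        simp [pvStepB, h2]
      rw [hs, ih v ps (c ++ [a])]
      rw [Prod.mk.injEq]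
      by_cases h1 : v - a = 1
      · have hroll : ¬ (v ≤ a) := by omega
        have hlt : ¬ (v - a < 1) := by omega
        constructor
        · simp [h1]
        · have := pvRollb_concat c a v
          simp [h1]
          simp [this, hroll]
      · have hlt : v - a < 1 := by omega
        have hroll : v ≤ a := by omega
        constructor
        · simp [h2]
        · have := pvRollb_concat c a v
          simp [hlt, this, hroll]
          ring

-- ===== VERDICT (by name: the statement is the Claim_ definition above) =====
theorem validate_stream_spec : Claim_equal_validate_stream := by
  intro stream _
  unfold Spec_validate_stream
  match stream with
  | [] => rfl
  | [x] =>
    show (1, 0) = validate_stream_alt [x]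
    simp [validate_stream_alt, pvRollb]
  | a :: v :: t =>
    show (((v :: t).foldl pvStepA (a, a, 1, 0)).2.2.1,
          ((v :: t).foldl pvStepA (a, a, 1, 0)).2.2.2)
        = ((((v :: t).foldl pvStepB [[a]]).length : Int),
           (((v :: t).foldl pvStepB [[a]]).map pvRollb).sum)
    have hA := loopA (v :: t) a a 1 0
    have hB := loopB (v :: t) a [] []
    simp only [List.nil_append] at hB
    rw [hA, hB]
    simp [pvRollb]
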